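-- pv_equiv track=rewrite | github.com/luzi82/clover.prototype.kirarafantasia | python3/clover/uarmswiftpro/touch_trace.py | imgline_to_int
-- ===== SOURCE A (Python) =====
-- def imgline_to_int(imgline):
--     ret = 0
--     i = 1
--     for p in imgline:
--         if p >=127:
--             ret+=i
--         i<<=1
--     return ret
-- ===== SOURCE B (Python) =====
-- def imgline_to_int(imgline):
--     ret = 0
--     for p in reversed(list(imgline)):
--         ret = (ret << 1) | (1 if p >= 127 else 0)
--     return ret
-- ===== Notes on version B (the rewrite author's own statement) =====
-- stated objective: alternative
-- what changed: B scans the pixels back-to-front and shifts a single accumulator (ret = (ret<<1)|bit) instead of tracking a separate running power-of-two weight added per set pixel.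
import Mathlib
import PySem

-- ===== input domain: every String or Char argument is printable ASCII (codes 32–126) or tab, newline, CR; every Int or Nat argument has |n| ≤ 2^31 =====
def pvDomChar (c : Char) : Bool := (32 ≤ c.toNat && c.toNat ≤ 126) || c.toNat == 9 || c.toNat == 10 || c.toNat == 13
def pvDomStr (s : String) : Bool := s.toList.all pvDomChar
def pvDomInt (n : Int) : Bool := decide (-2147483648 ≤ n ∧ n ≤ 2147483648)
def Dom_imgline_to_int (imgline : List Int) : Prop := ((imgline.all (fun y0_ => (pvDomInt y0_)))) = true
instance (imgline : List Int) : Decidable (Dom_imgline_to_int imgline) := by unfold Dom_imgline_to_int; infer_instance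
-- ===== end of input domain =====

-- B builds the mask by a reversed scan with a shift accumulator instead of a running power-of-two weight (alternative decomposition, same cost).


-- ===== PORT A =====
-- state (ret, i); 'i <<= 1' ported as i * 2 (exact: left shift by 1 on Python ints)
def imgline_to_int (imgline : List Int) : Int :=
  (imgline.foldl
    (fun (s : Int × Int) p => (if p ≥ 127 then s.1 + s.2 else s.1, s.2 * 2))
    (0, 1)).1

-- ===== PORT B =====
-- '(ret << 1) | bit' ported as ret * 2 + bit (exact: ret stays ≥ 0 and bit ∈ {0,1})
def imgline_to_int_alt (imgline : List Int) : Int :=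
  imgline.reverse.foldl (fun ret p => ret * 2 + (if p ≥ 127 then 1 else 0)) 0

-- ===== PRECONDITION & SPEC =====
def Spec_imgline_to_int (imgline : List Int) (out : Int) : Prop := out = imgline_to_int_alt imgline
instance (imgline : List Int) (out : Int) : Decidable (Spec_imgline_to_int imgline out) := by unfold Spec_imgline_to_int; infer_instance

-- ===== CLAIM (what is proved, stated in full; the proofs are below) =====
def Claim_equal_imgline_to_int : Prop := ∀ (imgline : List Int), Dom_imgline_to_int imgline → Spec_imgline_to_int imgline (imgline_to_int imgline)

-- ===== LEMMAS AND PROOFS =====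

-- the common value: big-endian fold over the list
def pvVal (xs : List Int) : Int :=
  xs.foldr (fun p acc => 2 * acc + (if p ≥ 127 then 1 else 0)) 0

theorem pvA_fold (xs : List Int) : ∀ r i : Int,
    (xs.foldl (fun (s : Int × Int) p => (if p ≥ 127 then s.1 + s.2 else s.1, s.2 * 2)) (r, i)).1
      = r + i * pvVal xs := by
  induction xs with
  | nil => intro r i; simp [pvVal]
  | cons p xs ih =>
    intro r i
    simp only [List.foldl_cons, pvVal, List.foldr_cons]
    rw [ih]
    by_cases h : p ≥ 127 <;> simp [h, pvVal] <;> ring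

theorem pvB_fold (xs : List Int) :
    xs.reverse.foldl (fun ret p => ret * 2 + (if p ≥ 127 then 1 else 0)) 0 = pvVal xs := by
  rw [List.foldl_reverse]
  unfold pvVal
  induction xs with
  | nil => rfl
  | cons p xs ih => simp only [List.foldr_cons, ih]; ring

-- ===== VERDICT (by name: the statement is the Claim_ definition above) =====
theorem imgline_to_int_spec : Claim_equal_imgline_to_int := by
  intro xs _
  unfold Spec_imgline_to_int imgline_to_int imgline_to_int_alt
  rw [pvA_fold, pvB_fold]
  ring
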